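-- pv_equiv track=rewrite | github.com/prashanthr11/Code-Chef | Practice/MODEFREQ.py | solve
-- ===== SOURCE A (Python) =====
-- from collections import Counter as di
--
-- def solve(l):
--     freq = di(l)
--     mode_freq = di(freq.values())
--
--     maxi = max(mode_freq.values())
--
--     ans = set()
--     for i in mode_freq:
--         if mode_freq[i] == maxi:
--             ans.add(i)
--
--     mini = int(1e9)
--
--     for i in freq:
--         if freq[i] in ans:
--             mini = min(mini, freq[i])
--
--     return mini
-- ===== SOURCE B (Python) =====
-- from collections import Counter as di
--
--
-- def _runs(counts):
--     # counts is sorted; split it into runs: [(value, run_length), ...]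
--     if not counts:
--         return []
--     x = counts[0]
--     k = 1
--     while k < len(counts) and counts[k] == x:
--         k += 1
--     return [(x, k)] + _runs(counts[k:])
--
--
-- def solve(l):
--     runs = _runs(sorted(di(l).values()))
--     m = max(k for _, k in runs)  # ValueError on empty input, like A
--     mini = 10 ** 9
--     for v, k in runs:
--         if k == m:
--             mini = min(mini, v)
--     return mini
-- ===== Notes on version B (the rewrite author's own statement) =====
-- stated objective: alternative
-- what changed: Replaces A's Counter-of-Counter hashmap plus set-build-then-rescan with sorting the frequency values once and scanning them as runs: each run directly gives (frequency value, multiplicity), the max multiplicity is taken over the runs, and the answer is the min-fold (with A's 10**9 INF start) over the runs of maximal length.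
import Mathlib
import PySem

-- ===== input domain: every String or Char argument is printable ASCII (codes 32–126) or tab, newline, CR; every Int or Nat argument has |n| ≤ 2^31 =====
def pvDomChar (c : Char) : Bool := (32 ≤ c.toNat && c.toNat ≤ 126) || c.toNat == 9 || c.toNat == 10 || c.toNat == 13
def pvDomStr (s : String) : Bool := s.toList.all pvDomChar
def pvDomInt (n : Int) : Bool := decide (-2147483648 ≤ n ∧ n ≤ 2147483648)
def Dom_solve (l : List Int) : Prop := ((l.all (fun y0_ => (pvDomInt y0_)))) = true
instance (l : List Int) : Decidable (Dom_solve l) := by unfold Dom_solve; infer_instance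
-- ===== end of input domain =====

-- B replaces A's Counter-of-Counter hashmap plus set-build-then-rescan by sorting the frequency
-- values and scanning them as runs (keeping A's 10**9 INF initialisation of the final min fold);
-- objective: alternative (same cost, different algorithm).

-- ===== PORT A =====
def solve (l : List Int) : Int :=
  let freq := PySem.Dict.counter l
  let modeFreq := PySem.Dict.counter freq.values
  match PySem.List.max? modeFreq.values (fun x => x) with
  | none => 0   -- unreachable: Pre_solve requires l ≠ [], Python raises ValueError here
  | some maxi =>
    let ans := modeFreq.keys.foldl
      (fun s i => if modeFreq.getD i 0 == maxi then PySem.Set.add s i else s) PySem.Set.empty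
    freq.keys.foldl
      (fun mini i => if PySem.Set.contains ans (freq.getD i 0)
                     then min mini (freq.getD i 0) else mini) 1000000000

-- ===== PORT B =====
-- _runs(counts): split a (sorted) list into runs [(value, run_length), …]
def pvRuns : List Int → List (Int × Int)
  | [] => []
  | x :: t =>
    (x, ((t.takeWhile (fun y => y == x)).length : Int) + 1)
      :: pvRuns (t.dropWhile (fun y => y == x))
termination_by s => s.length
decreasing_by
  simpa using Nat.lt_succ_of_le (List.length_dropWhile_le (fun y => y == x) t)

def solve_alt (l : List Int) : Int :=
  let runs := pvRuns (PySem.List.sorted (PySem.Dict.counter l).values (fun x => x) false)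
  match PySem.List.max? (runs.map (fun p => p.2)) (fun x => x) with
  | none => 0   -- unreachable under Pre_solve: Python raises ValueError here
  | some m =>
    runs.foldl (fun mini p => if p.2 == m then min mini p.1 else mini) 1000000000

-- ===== PRECONDITION & SPEC =====
-- Pre_: on the empty list A raises ValueError (max of an empty sequence); B raises too.
def Pre_solve (l : List Int) : Prop := l ≠ []
instance (l : List Int) : Decidable (Pre_solve l) := by unfold Pre_solve; infer_instance
def pvWitness_solve : List Int := [1]

def Spec_solve (l : List Int) (out : Int) : Prop := out = solve_alt l
instance (l : List Int) (out : Int) : Decidable (Spec_solve l out) := by unfold Spec_solve; infer_instance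

-- ===== CLAIM (what is proved, stated in full; the proofs are below) =====
def Claim_equal_solve : Prop := ∀ (l : List Int), Dom_solve l → Pre_solve l → Spec_solve l (solve l)

-- ===== LEMMAS AND PROOFS =====

-- max (no key) of two nonempty lists with the same members is the same value
theorem pv_max_id_unique {xs ys : List Int} {a b : Int}
    (ha : PySem.List.max? xs (fun x => x) = some a)
    (hb : PySem.List.max? ys (fun x => x) = some b)
    (h : ∀ z : Int, z ∈ xs ↔ z ∈ ys) : a = b := by
  have hma := PySem.List.max?_mem ha
  have hmb := PySem.List.max?_mem hb
  exact le_antisymm (PySem.List.max?_isMax hb a ((h a).mp hma))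
                    (PySem.List.max?_isMax ha b ((h b).mpr hmb))

-- a running min over a list depends only on the set of members
theorem pv_foldl_min_eq_of_same_mem (xs ys : List Int) (a : Int)
    (h : ∀ v : Int, v ∈ xs ↔ v ∈ ys) : xs.foldl min a = ys.foldl min a := by
  have hx := PySem.List.foldl_min_le xs a
  have hy := PySem.List.foldl_min_le ys a
  refine le_antisymm ?_ ?_
  · rcases PySem.List.foldl_min_mem ys a with he | hm
    · rw [he]; exact hx.1
    · exact hx.2 _ ((h _).mpr hm)
  · rcases PySem.List.foldl_min_mem xs a with he | hm
    · rw [he]; exact hy.1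
    · exact hy.2 _ ((h _).mp hm)

-- in a sorted list bounded below by x, dropping the leading x-run drops every x
theorem pv_not_mem_drop (x : Int) : ∀ (t : List Int), t.Pairwise (· ≤ ·) → (∀ y ∈ t, x ≤ y) →
    x ∉ t.dropWhile (fun y => y == x)
  | [], _, _ => by simp
  | a :: t', hp, hle => by
    by_cases hax : (a == x) = true
    · rw [List.dropWhile_cons, if_pos hax]
      exact pv_not_mem_drop x t' (List.pairwise_cons.mp hp).2
        (fun y hy => hle y (List.mem_cons_of_mem _ hy))
    · rw [List.dropWhile_cons, if_neg hax]
      intro hxm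
      rcases List.mem_cons.mp hxm with rfl | hxt
      · exact hax (by simp)
      · have h1 : a ≤ x := (List.pairwise_cons.mp hp).1 x hxt
        have h2 : x ≤ a := hle a List.mem_cons_self
        exact hax (by simp [le_antisymm h1 h2])

-- the elements after the first run of a sorted list are strictly greater than its value
theorem pv_rest_gt {x : Int} {t : List Int} (hs : (x :: t).Pairwise (· ≤ ·)) :
    ∀ y ∈ t.dropWhile (fun y => y == x), x < y := by
  have hle : ∀ y ∈ t, x ≤ y := (List.pairwise_cons.mp hs).1
  have hnm : x ∉ t.dropWhile (fun y => y == x) :=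
    pv_not_mem_drop x t (List.pairwise_cons.mp hs).2 hle
  intro y hy
  have hyt : y ∈ t := (List.dropWhile_sublist _).subset hy
  exact lt_of_le_of_ne (hle y hyt) (fun h => hnm (h ▸ hy))

-- membership characterisation of the runs of a sorted list
theorem pv_runs_mem (s : List Int) (hs : s.Pairwise (· ≤ ·)) (p : Int × Int) :
    p ∈ pvRuns s ↔ p.1 ∈ s ∧ p.2 = (s.count p.1 : Int) := by
  induction s using pvRuns.induct with
  | case1 => simp [pvRuns]
  | case2 x t ih =>
    have hgt := pv_rest_gt hs
    have hrest : (t.dropWhile (fun y => y == x)).Pairwise (· ≤ ·) :=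
      List.Pairwise.sublist (List.dropWhile_sublist _) (List.pairwise_cons.mp hs).2
    have hxnr : x ∉ t.dropWhile (fun y => y == x) := fun hx => lt_irrefl x (hgt x hx)
    have hrun : ∀ y ∈ t.takeWhile (fun y => y == x), y = x := by
      intro y hy; simpa using List.mem_takeWhile_imp hy
    have hsplit : t.takeWhile (fun y => y == x) ++ t.dropWhile (fun y => y == x) = t :=
      List.takeWhile_append_dropWhile
    have hcount_run : (t.takeWhile (fun y => y == x)).count x
        = (t.takeWhile (fun y => y == x)).length := by
      rw [List.count_eq_length]
      intro y hy; exact (hrun y hy) ▸ rfl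
    have hct : t.count x = (t.takeWhile (fun y => y == x)).length := by
      conv_lhs => rw [← hsplit]
      rw [List.count_append, hcount_run, List.count_eq_zero.mpr hxnr, Nat.add_zero]
    have hcx : ((x :: t).count x : Int)
        = ((t.takeWhile (fun y => y == x)).length : Int) + 1 := by
      rw [List.count_cons_self, hct]; push_cast; ring
    have hcv : ∀ v ∈ t.dropWhile (fun y => y == x),
        (x :: t).count v = (t.dropWhile (fun y => y == x)).count v := by
      intro v hv
      have hvx : v ≠ x := fun h => lt_irrefl x (h ▸ hgt v hv)
      have hrun0 : (t.takeWhile (fun y => y == x)).count v = 0 :=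
        List.count_eq_zero.mpr (fun hvr => hvx (hrun v hvr))
      rw [List.count_cons_of_ne (Ne.symm hvx)]
      conv_lhs => rw [← hsplit]
      rw [List.count_append, hrun0, Nat.zero_add]
    rw [pvRuns]
    constructor
    · intro hp
      rcases List.mem_cons.mp hp with rfl | hp'
      · exact ⟨by simp, by simpa using hcx.symm⟩
      · obtain ⟨h1, h2⟩ := (ih hrest).mp hp'
        refine ⟨List.mem_cons_of_mem _ ((List.dropWhile_sublist _).subset h1), ?_⟩
        rw [h2, hcv p.1 h1]
    · rintro ⟨h1, h2⟩
      by_cases hpx : p.1 = x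
      · have h3 : p.2 = ((t.takeWhile (fun y => y == x)).length : Int) + 1 := by
          rw [h2, hpx, hcx]
        exact List.mem_cons.mpr (Or.inl (Prod.ext hpx h3))
      · right
        have hpt : p.1 ∈ t := by
          rcases List.mem_cons.mp h1 with h | h
          · exact absurd h hpx
          · exact h
        have hpr : p.1 ∈ t.dropWhile (fun y => y == x) := by
          rcases (List.mem_append.mp (hsplit ▸ hpt)) with h | h
          · exact absurd (hrun _ h) hpx
          · exact h
        exact (ih hrest).mpr ⟨hpr, by rw [h2, hcv p.1 hpr]⟩

-- A's values list of a counter, as a map over the distinct elements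
theorem pv_counter_values (xs : List Int) :
    (PySem.Dict.counter xs).values
      = (PySem.Set.ofList xs).map (fun v => (xs.count v : Int)) := by
  rw [PySem.Dict.values_eq_map_keys _ (PySem.Dict.nodup_keys_counter xs) 0,
    PySem.Dict.keys_counter]
  exact List.map_congr_left (fun v _ => PySem.Dict.getD_counter xs v)

theorem solve_eq_solve_alt (l : List Int) (hl : l ≠ []) : solve l = solve_alt l := by
  have hperm : (PySem.List.sorted (PySem.Dict.counter l).values (fun x => x) false).Perm (PySem.Dict.counter l).values := PySem.List.sorted_perm (PySem.Dict.counter l).values (fun x => x) false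
  have hsorted : (PySem.List.sorted (PySem.Dict.counter l).values (fun x => x) false).Pairwise (· ≤ ·) := PySem.List.sorted_pairwise (PySem.Dict.counter l).values (fun x => x)
  have hcne : (PySem.Dict.counter l).values ≠ [] := by
    rw [pv_counter_values]
    intro h
    rcases List.exists_mem_of_ne_nil l hl with ⟨a, ha⟩
    rw [List.map_eq_nil_iff] at h
    have ham : a ∈ PySem.Set.ofList l := (PySem.Set.mem_ofList l a).mpr ha
    rw [h] at ham
    exact absurd ham List.not_mem_nil
  have hsne : (PySem.List.sorted (PySem.Dict.counter l).values (fun x => x) false) ≠ [] := fun h => hcne (((h ▸ hperm) : ([] : List Int).Perm (PySem.Dict.counter l).values).symm.eq_nil)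
  have hruns : ∀ p : Int × Int, p ∈ pvRuns (PySem.List.sorted (PySem.Dict.counter l).values (fun x => x) false) ↔
      p.1 ∈ (PySem.Dict.counter l).values ∧ p.2 = (((PySem.Dict.counter l).values.count p.1 : Int)) := by
    intro p
    rw [pv_runs_mem (PySem.List.sorted (PySem.Dict.counter l).values (fun x => x) false) hsorted p]
    rw [hperm.mem_iff, hperm.count_eq]
  have hrne : pvRuns (PySem.List.sorted (PySem.Dict.counter l).values (fun x => x) false) ≠ [] := by
    cases hse : (PySem.List.sorted (PySem.Dict.counter l).values (fun x => x) false) with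
    | nil => exact absurd hse hsne
    | cons a t => rw [pvRuns]; exact List.cons_ne_nil _ _
  have hvals : (PySem.Dict.counter (PySem.Dict.counter l).values).values
      = (PySem.Set.ofList (PySem.Dict.counter l).values).map (fun v => ((PySem.Dict.counter l).values.count v : Int)) := pv_counter_values (PySem.Dict.counter l).values
  have hmvne : (PySem.Dict.counter (PySem.Dict.counter l).values).values ≠ [] := by
    rw [hvals]
    intro h
    rcases List.exists_mem_of_ne_nil (PySem.Dict.counter l).values hcne with ⟨a, ha⟩
    rw [List.map_eq_nil_iff] at h
    have ham : a ∈ PySem.Set.ofList (PySem.Dict.counter l).values := (PySem.Set.mem_ofList (PySem.Dict.counter l).values a).mpr ha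
    rw [h] at ham
    exact absurd ham List.not_mem_nil
  obtain ⟨maxi, hmaxi⟩ : ∃ m, PySem.List.max? (PySem.Dict.counter (PySem.Dict.counter l).values).values (fun x => x) = some m := by
    cases hm : PySem.List.max? (PySem.Dict.counter (PySem.Dict.counter l).values).values (fun x => x) with
    | none => exact absurd ((PySem.List.max?_eq_none_iff _ _).mp hm) hmvne
    | some m => exact ⟨m, rfl⟩
  obtain ⟨m, hm⟩ : ∃ m, PySem.List.max? ((pvRuns (PySem.List.sorted (PySem.Dict.counter l).values (fun x => x) false)).map (fun p => p.2)) (fun x => x) = some m := by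
    cases hm : PySem.List.max? ((pvRuns (PySem.List.sorted (PySem.Dict.counter l).values (fun x => x) false)).map (fun p => p.2)) (fun x => x) with
    | none =>
      have h := (PySem.List.max?_eq_none_iff _ _).mp hm
      rw [List.map_eq_nil_iff] at h
      exact absurd h hrne
    | some m => exact ⟨m, rfl⟩
  have hsamemem : ∀ z : Int, z ∈ (PySem.Dict.counter (PySem.Dict.counter l).values).values ↔ z ∈ (pvRuns (PySem.List.sorted (PySem.Dict.counter l).values (fun x => x) false)).map (fun p => p.2) := by
    intro z
    rw [hvals]
    constructor
    · intro hz
      obtain ⟨v, hv, rfl⟩ := List.mem_map.mp hz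
      have hvc : v ∈ (PySem.Dict.counter l).values := (PySem.Set.mem_ofList (PySem.Dict.counter l).values v).mp hv
      exact List.mem_map.mpr ⟨(v, ((PySem.Dict.counter l).values.count v : Int)), (hruns _).mpr ⟨hvc, rfl⟩, rfl⟩
    · intro hz
      obtain ⟨p, hp, rfl⟩ := List.mem_map.mp hz
      obtain ⟨h1, h2⟩ := (hruns p).mp hp
      exact List.mem_map.mpr ⟨p.1, (PySem.Set.mem_ofList (PySem.Dict.counter l).values p.1).mpr h1, h2.symm⟩
  have hmm : maxi = m := pv_max_id_unique hmaxi hm hsamemem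
  have hans : ∀ v : Int,
      PySem.Set.contains
        ((PySem.Dict.counter (PySem.Dict.counter l).values).keys.foldl
          (fun s i => if (PySem.Dict.counter (PySem.Dict.counter l).values).getD i 0 == maxi then PySem.Set.add s i else s)
          PySem.Set.empty) v = true
      ↔ (v ∈ (PySem.Dict.counter l).values ∧ ((PySem.Dict.counter l).values.count v : Int) = maxi) := by
    intro v
    rw [PySem.List.foldl_if_eq_foldl_filter (fun i => (PySem.Dict.counter (PySem.Dict.counter l).values).getD i 0 == maxi)
      PySem.Set.add, show (PySem.Set.empty : PySem.Set Int) = ([] : List Int) from rfl,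
      ← PySem.Set.ofList_eq_foldl, PySem.Set.contains_iff, PySem.Set.mem_ofList,
      List.mem_filter, PySem.Dict.keys_counter, PySem.Set.mem_ofList]
    constructor
    · rintro ⟨h1, h2⟩
      refine ⟨h1, ?_⟩
      have h3 := of_decide_eq_true h2
      rwa [PySem.Dict.getD_counter] at h3
    · rintro ⟨h1, h2⟩
      exact ⟨h1, decide_eq_true (by rwa [PySem.Dict.getD_counter])⟩
  -- reduce A to a min-fold over a filtered list
  have hA : solve l
      = ((PySem.Dict.counter l).values.filter (fun v => decide (v ∈ (PySem.Dict.counter l).values ∧ ((PySem.Dict.counter l).values.count v : Int) = maxi))).foldl min 1000000000 := by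
    show (match PySem.List.max? (PySem.Dict.counter (PySem.Dict.counter l).values).values (fun x => x) with
      | none => (0 : Int)
      | some maxi =>
        (PySem.Dict.counter l).keys.foldl
          (fun mini i => if PySem.Set.contains
              ((PySem.Dict.counter (PySem.Dict.counter l).values).keys.foldl
                (fun s i => if (PySem.Dict.counter (PySem.Dict.counter l).values).getD i 0 == maxi then PySem.Set.add s i else s)
                PySem.Set.empty) ((PySem.Dict.counter l).getD i 0)
            then min mini ((PySem.Dict.counter l).getD i 0) else mini) 1000000000) = _
    simp only [hmaxi]
    have hkeys : (PySem.Dict.counter l).values = (PySem.Dict.counter l).keys.map (fun k => (PySem.Dict.counter l).getD k 0) :=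
      PySem.Dict.values_eq_map_keys _ (PySem.Dict.nodup_keys_counter l) 0
    rw [← List.foldl_map (f := fun k => (PySem.Dict.counter l).getD k 0)
      (g := fun (mini v : Int) => if PySem.Set.contains ((PySem.Dict.counter (PySem.Dict.counter l).values).keys.foldl
          (fun s i => if (PySem.Dict.counter (PySem.Dict.counter l).values).getD i 0 == maxi then PySem.Set.add s i else s)
          PySem.Set.empty) v then min mini v else mini)
      (l := (PySem.Dict.counter l).keys) (init := 1000000000)]
    rw [← hkeys]
    rw [PySem.List.foldl_if_eq_foldl_filter (fun v => PySem.Set.contains ((PySem.Dict.counter (PySem.Dict.counter l).values).keys.foldl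
          (fun s i => if (PySem.Dict.counter (PySem.Dict.counter l).values).getD i 0 == maxi then PySem.Set.add s i else s)
          PySem.Set.empty) v) min]
    congr 1
    apply List.filter_congr
    intro x hx
    by_cases h : x ∈ (PySem.Dict.counter l).values ∧ ((PySem.Dict.counter l).values.count x : Int) = maxi
    · rw [(hans x).mpr h, decide_eq_true h]
    · rw [decide_eq_false h]
      rcases Bool.eq_false_or_eq_true (PySem.Set.contains ((PySem.Dict.counter (PySem.Dict.counter l).values).keys.foldl
          (fun s i => if (PySem.Dict.counter (PySem.Dict.counter l).values).getD i 0 == maxi then PySem.Set.add s i else s)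
          PySem.Set.empty) x) with ht | hf
      · exact absurd ((hans x).mp ht) h
      · exact hf
  -- reduce B to a min-fold over a filtered list
  have hB : solve_alt l
      = (((pvRuns (PySem.List.sorted (PySem.Dict.counter l).values (fun x => x) false)).filter (fun p => p.2 == m)).map (fun p => p.1)).foldl min 1000000000 := by
    show (match PySem.List.max? ((pvRuns (PySem.List.sorted (PySem.Dict.counter l).values (fun x => x) false)).map (fun p => p.2)) (fun x => x) with
      | none => (0 : Int)
      | some m =>
        (pvRuns (PySem.List.sorted (PySem.Dict.counter l).values (fun x => x) false)).foldl (fun (mini : Int) (p : Int × Int) => if p.2 == m then min mini p.1 else mini) 1000000000) = _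
    simp only [hm]
    rw [PySem.List.foldl_if_eq_foldl_filter (fun p : Int × Int => p.2 == m)
      (fun mini p => min mini p.1), ← List.foldl_map (f := fun p : Int × Int => p.1) (g := min)]
  rw [hA, hB]
  apply pv_foldl_min_eq_of_same_mem
  intro v
  rw [List.mem_filter, List.mem_map]
  constructor
  · rintro ⟨h1, h2⟩
    obtain ⟨hvc, hcnt⟩ := of_decide_eq_true h2
    refine ⟨(v, ((PySem.Dict.counter l).values.count v : Int)), List.mem_filter.mpr ⟨(hruns _).mpr ⟨hvc, rfl⟩, ?_⟩, rfl⟩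
    simpa using hmm ▸ hcnt
  · rintro ⟨p, hpfil, rfl⟩
    obtain ⟨hpr, hpm⟩ := List.mem_filter.mp hpfil
    obtain ⟨h1, h2⟩ := (hruns p).mp hpr
    refine ⟨h1, decide_eq_true ⟨h1, ?_⟩⟩
    rw [← h2, hmm]
    simpa using hpm

-- ===== VERDICT (by name: the statement is the Claim_ definition above) =====
theorem solve_spec : Claim_equal_solve := by
  intro l _ hpre
  unfold Spec_solve
  exact solve_eq_solve_alt l hpre
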